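-- pv_equiv track=rewrite | github.com/Nghia03092004/nghia03092004.github.io | project_euler/problem_824/solution.py | count_antichains_brute
-- ===== SOURCE A (Python) =====
-- from itertools import combinations
--
-- def count_antichains_brute(n):
--     """Count all antichains in divisibility poset on {1..n}."""
--     elements = list(range(1, n + 1))
--     count = 1  # empty set
--     for size in range(1, n + 1):
--         for subset in combinations(elements, size):
--             is_antichain = True
--             for i in range(len(subset)):
--                 for j in range(i+1, len(subset)):
--                     a, b = subset[i], subset[j]
--                     if a % b == 0 or b % a == 0:
--                         is_antichain = False
--                         break
--                 if not is_antichain: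
--                     break
--             if is_antichain:
--                 count += 1
--     return count
-- ===== SOURCE B (Python) =====
-- def count_antichains_brute(n):
--     """Count all antichains in divisibility poset on {1..n}."""
--     def rec(i, chosen):
--         if i > n:
--             return 1
--         total = rec(i + 1, chosen)
--         if all(i % c != 0 and c % i != 0 for c in chosen):
--             total += rec(i + 1, chosen + [i])
--         return total
--     return rec(1, [])
-- ===== Notes on version B (the rewrite author's own statement) =====
-- stated objective: alternative
-- what changed: B replaces A's enumeration of every subset by size (each filtered with a pairwise divisibility check) with recursive backtracking that only extends partial antichains, checking each new element against the chosen set and pruning comparable branches (intended as faster; a timing run measured a large ratio at the largest size but could not confirm the label).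
import Mathlib
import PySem

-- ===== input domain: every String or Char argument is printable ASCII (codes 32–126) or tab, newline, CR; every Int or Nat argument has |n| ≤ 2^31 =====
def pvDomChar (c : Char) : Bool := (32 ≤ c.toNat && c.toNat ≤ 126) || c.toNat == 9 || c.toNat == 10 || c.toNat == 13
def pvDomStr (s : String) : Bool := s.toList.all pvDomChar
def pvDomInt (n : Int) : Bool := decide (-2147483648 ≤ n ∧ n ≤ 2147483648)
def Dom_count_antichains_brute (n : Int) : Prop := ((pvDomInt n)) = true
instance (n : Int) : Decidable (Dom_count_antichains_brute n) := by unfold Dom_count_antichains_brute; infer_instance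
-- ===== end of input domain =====

-- B replaces A's full-subset enumeration with recursive backtracking over partial antichains, pruning comparable branches.


-- ===== PORT A =====
-- itertools.combinations(l, k) (as a list of k-element subsequences; order of enumeration
-- is irrelevant to A's count, which is all A uses it for)
def pvComboA (l : List Int) : Nat → List (List Int)
  | 0 => [[]]
  | k + 1 =>
    match l with
    | [] => []
    | a :: t => (pvComboA t k).map (fun s => a :: s) ++ pvComboA t (k + 1)

-- the i/j double loop with breaks: subset is an antichain iff every earlier element is
-- incomparable to every later one (break = early exit, same Boolean value)
def pvIsAntiA : List Int → Bool
  | [] => true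
  | a :: t => (t.all fun b => !(PySem.Int.mod a b == 0 || PySem.Int.mod b a == 0)) && pvIsAntiA t

def count_antichains_brute (n : Int) : Int :=
  let elements := PySem.List.pyRange 1 (n + 1) 1
  (PySem.List.pyRange 1 (n + 1) 1).foldl
    (fun count size =>
      (pvComboA elements size.toNat).foldl
        (fun c subset => if pvIsAntiA subset then c + 1 else c) count)
    1

-- ===== PORT B =====
-- all(i % c != 0 and c % i != 0 for c in chosen)
def pvOkB (chosen : List Int) (i : Int) : Bool :=
  chosen.all fun c => !(PySem.Int.mod i c == 0) && !(PySem.Int.mod c i == 0)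

-- rec(i, chosen), with the remaining elements i..n passed as a list
def pvRecB (chosen : List Int) : List Int → Int
  | [] => 1
  | i :: rest =>
    let total := pvRecB chosen rest
    if pvOkB chosen i then total + pvRecB (chosen ++ [i]) rest else total

def count_antichains_brute_alt (n : Int) : Int :=
  pvRecB [] (PySem.List.pyRange 1 (n + 1) 1)

-- ===== PRECONDITION & SPEC =====
def Spec_count_antichains_brute (n : Int) (out : Int) : Prop := out = count_antichains_brute_alt n
instance (n : Int) (out : Int) : Decidable (Spec_count_antichains_brute n out) := by unfold Spec_count_antichains_brute; infer_instance

-- ===== CLAIM (what is proved, stated in full; the proofs are below) =====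
def Claim_equal_count_antichains_brute : Prop := ∀ (n : Int), Dom_count_antichains_brute n → Spec_count_antichains_brute n (count_antichains_brute n)

-- ===== LEMMAS AND PROOFS =====

-- all subsequences of l (order of enumeration irrelevant: only counts are used)
def pvSubs : List Int → List (List Int)
  | [] => [[]]
  | a :: t => pvSubs t ++ (pvSubs t).map (fun s => a :: s)

-- "S can extend the antichain `chosen`, element by element"
def pvChainOK (chosen : List Int) : List Int → Bool
  | [] => true
  | a :: S => pvOkB chosen a && pvChainOK (chosen ++ [a]) S

theorem pvComboA_big : ∀ (l : List Int) (k : Nat), l.length < k → pvComboA l k = [] := by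
  intro l
  induction l with
  | nil =>
    intro k h
    match k, h with
    | k + 1, _ => rfl
  | cons a t ih =>
    intro k h
    match k, h with
    | k + 1, h =>
      have h1 : t.length < k := by simp at h; omega
      have h2 : t.length < k + 1 := by omega
      simp [pvComboA, ih _ h1, ih _ h2]

theorem pvRecB_count (rest : List Int) : ∀ chosen,
    pvRecB chosen rest = ((pvSubs rest).countP (pvChainOK chosen) : Int) := by
  induction rest with
  | nil => intro chosen; simp [pvRecB, pvSubs, pvChainOK]
  | cons i rest ih =>
    intro chosen
    have hmap : ((pvSubs rest).map (fun s => i :: s)).countP (pvChainOK chosen)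
        = (pvSubs rest).countP (fun S => pvOkB chosen i && pvChainOK (chosen ++ [i]) S) := by
      rw [List.countP_map]; rfl
    by_cases h : pvOkB chosen i = true
    · simp only [pvRecB, pvSubs, List.countP_append, hmap, h, Bool.true_and,
        ih chosen, ih (chosen ++ [i])]
      push_cast
      ring
    · have h' : pvOkB chosen i = false := by simpa using h
      simp only [pvRecB, pvSubs, List.countP_append, hmap, h', Bool.false_and,
        ih chosen]
      have : (pvSubs rest).countP (fun _ => false) = 0 := by simp
      simp [this]

theorem pvAll_and (l : List Int) (p q : Int → Bool) :
    (l.all fun x => p x && q x) = (l.all p && l.all q) := by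
  induction l with
  | nil => rfl
  | cons a t ih =>
    simp only [List.all_cons, ih]
    cases p a <;> cases q a <;> cases t.all p <;> cases t.all q <;> rfl

theorem pvChainOK_eq (S : List Int) : ∀ chosen,
    pvChainOK chosen S = (S.all (pvOkB chosen) && pvIsAntiA S) := by
  induction S with
  | nil => intro chosen; simp [pvChainOK, pvIsAntiA]
  | cons a S ih =>
    intro chosen
    have hpt : ∀ x : Int, pvOkB (chosen ++ [a]) x
        = (pvOkB chosen x && (!(PySem.Int.mod a x == 0 || PySem.Int.mod x a == 0))) := by
      intro x
      simp only [pvOkB, List.all_append, List.all_cons, List.all_nil, Bool.and_true, Bool.not_or]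
      cases PySem.Int.mod x a == 0 <;> cases PySem.Int.mod a x == 0 <;>
        cases (chosen.all fun c => !(PySem.Int.mod x c == 0) && !(PySem.Int.mod c x == 0)) <;> rfl
    have hall : (S.all fun x => pvOkB (chosen ++ [a]) x)
        = (S.all (pvOkB chosen) && S.all fun b => !(PySem.Int.mod a b == 0 || PySem.Int.mod b a == 0)) := by
      rw [funext hpt, pvAll_and]
    simp only [pvChainOK, ih (chosen ++ [a]), pvIsAntiA, List.all_cons, hall]
    cases pvOkB chosen a <;> cases S.all (pvOkB chosen) <;> cases pvIsAntiA S <;>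
      cases (S.all fun b => !(PySem.Int.mod a b == 0 || PySem.Int.mod b a == 0)) <;> rfl

theorem pvCombo_count (l : List Int) : ∀ (p : List Int → Bool),
    ∑ k ∈ Finset.range (l.length + 1), (pvComboA l k).countP p = (pvSubs l).countP p := by
  induction l with
  | nil => intro p; simp [pvComboA, pvSubs]
  | cons a t ih =>
    intro p
    have hstep : ∀ k, (pvComboA (a :: t) (k + 1)).countP p
        = (pvComboA t k).countP (fun s => p (a :: s)) + (pvComboA t (k + 1)).countP p := by
      intro k
      simp only [pvComboA, List.countP_append, List.countP_map]
      rfl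
    have h0 : (pvComboA (a :: t) 0).countP p = (pvComboA t 0).countP p := by simp [pvComboA]
    have big : (pvComboA t (t.length + 1)).countP p = 0 := by
      rw [pvComboA_big t (t.length + 1) (by omega)]; rfl
    calc ∑ k ∈ Finset.range ((a :: t).length + 1), (pvComboA (a :: t) k).countP p
        = (∑ k ∈ Finset.range (t.length + 1), (pvComboA (a :: t) (k + 1)).countP p)
            + (pvComboA (a :: t) 0).countP p := by
          rw [show (a :: t).length + 1 = (t.length + 1) + 1 from by simp]
          exact Finset.sum_range_succ' _ _
      _ = (∑ k ∈ Finset.range (t.length + 1), ((pvComboA t k).countP (fun s => p (a :: s)) + (pvComboA t (k + 1)).countP p))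
            + (pvComboA t 0).countP p := by rw [h0]; simp only [hstep]
      _ = (∑ k ∈ Finset.range (t.length + 1), (pvComboA t k).countP (fun s => p (a :: s)))
            + ((∑ k ∈ Finset.range (t.length + 1), (pvComboA t (k + 1)).countP p) + (pvComboA t 0).countP p) := by
          rw [Finset.sum_add_distrib, add_assoc]
      _ = (pvSubs t).countP (fun s => p (a :: s))
            + ∑ k ∈ Finset.range (t.length + 1 + 1), (pvComboA t k).countP p := by
          rw [ih (fun s => p (a :: s)), ← Finset.sum_range_succ' (fun k => (pvComboA t k).countP p)]
      _ = (pvSubs t).countP (fun s => p (a :: s)) + (pvSubs t).countP p := by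
          rw [Finset.sum_range_succ, big, add_zero, ih p]
      _ = (pvSubs (a :: t)).countP p := by
          simp only [pvSubs, List.countP_append, List.countP_map]
          have hc : (p ∘ fun s => a :: s) = fun s => p (a :: s) := rfl
          rw [hc]; omega

theorem pvFoldl_count (L : List (List Int)) (p : List Int → Bool) : ∀ (acc : Int),
    L.foldl (fun c s => if p s then c + 1 else c) acc = acc + (L.countP p : Int) := by
  induction L with
  | nil => intro acc; simp
  | cons s L ih =>
    intro acc
    by_cases h : p s = true <;> simp [h, ih] <;> ring

theorem pvFoldl_range_add (N : Nat) (g : Nat → Int) : ∀ (acc : Int),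
    (List.range N).foldl (fun c k => c + g k) acc = acc + ∑ k ∈ Finset.range N, g k := by
  induction N with
  | zero => intro acc; simp
  | succ N ih =>
    intro acc
    rw [List.range_succ, List.foldl_append, ih, Finset.sum_range_succ]
    simp [add_assoc]

-- ===== VERDICT (by name: the statement is the Claim_ definition above) =====
theorem count_antichains_brute_spec : Claim_equal_count_antichains_brute := by
  intro n _
  unfold Spec_count_antichains_brute count_antichains_brute count_antichains_brute_alt
  have hrN : ∀ N : Nat, PySem.List.pyRange 1 ((N : Int) + 1) 1 = (List.range N).map (fun k : Nat => (1 : Int) + (k : Int)) := by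
    intro N
    induction N with
    | zero => simp [PySem.List.pyRange_one_eq_nil]
    | succ N ih =>
      rw [show (((N + 1 : Nat) : Int) + 1) = ((N : Int) + 1) + 1 from by push_cast; ring,
        PySem.List.pyRange_one_succ_right (by omega), ih, List.range_succ, List.map_append]
      simp [add_comm]
  have hr : PySem.List.pyRange 1 (n + 1) 1 = (List.range n.toNat).map (fun k : Nat => (1 : Int) + (k : Int)) := by
    by_cases hn : 0 ≤ n
    · rw [show n + 1 = (n.toNat : Int) + 1 from by omega]
      exact hrN n.toNat
    · rw [PySem.List.pyRange_one_eq_nil (by omega), show n.toNat = 0 from by omega]  -- n < 0: empty range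
      simp
  rw [hr]
  have main : ∀ (N : Nat) (L : List Int), L.length = N →
      List.foldl (fun count size =>
          (pvComboA L size.toNat).foldl (fun c subset => if pvIsAntiA subset then c + 1 else c) count)
        1 ((List.range N).map (fun k : Nat => (1 : Int) + (k : Int)))
      = ((pvSubs L).countP pvIsAntiA : Int) := by
    intro N L hlen
    simp only [List.foldl_map]
    have hfun : (fun (c : Int) (k : Nat) =>
        (pvComboA L ((1 : Int) + (k : Int)).toNat).foldl
          (fun c subset => if pvIsAntiA subset then c + 1 else c) c)
        = fun c k => c + ((pvComboA L (k + 1)).countP pvIsAntiA : Int) := by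
      funext c k
      rw [show ((1 : Int) + (k : Int)).toNat = k + 1 from by omega]
      exact pvFoldl_count _ _ c
    rw [hfun, pvFoldl_range_add]
    have h0 : (pvComboA L 0).countP pvIsAntiA = 1 := by
      simp [pvComboA, pvIsAntiA]
    have hcc := pvCombo_count L pvIsAntiA
    rw [hlen] at hcc
    rw [← hcc, Finset.sum_range_succ' (fun k => (pvComboA L k).countP pvIsAntiA) N, h0]
    push_cast
    ring
  have hchain : ∀ S ∈ pvSubs ((List.range n.toNat).map (fun k : Nat => (1 : Int) + (k : Int))),
      (pvChainOK [] S = true) ↔ (pvIsAntiA S = true) := by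
    intro S _
    rw [pvChainOK_eq]
    simp [pvOkB]
  rw [pvRecB_count, List.countP_congr hchain]
  exact main n.toNat _ (by simp)
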